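-- pv_equiv track=rewrite | github.com/srujithnandan/AI-powered-Interview-Simulation-Resume-Intelligence | MyWebApiPython/main.py | _keyword_overlap
-- ===== SOURCE A (Python) =====
-- def _keyword_overlap(question_keys: set[str], answer_keys: set[str]) -> int:
--     hits = 0
--     for qk in question_keys:
--         if qk in answer_keys:
--             hits += 1
--             continue
--         if len(qk) >= 5 and any(ak.startswith(qk[:5]) or qk.startswith(ak[:5]) for ak in answer_keys if len(ak) >= 5):
--             hits += 1
--     return hits
-- ===== SOURCE B (Python) =====
-- def _keyword_overlap(question_keys: set[str], answer_keys: set[str]) -> int: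
--     qs = list(question_keys)
--     by_exact = {}
--     for i, q in enumerate(qs):
--         by_exact.setdefault(q, []).append(i)
--     by_prefix = {}
--     for i, q in enumerate(qs):
--         if len(q) >= 5:
--             by_prefix.setdefault(q[:5], []).append(i)
--     hit = [False] * len(qs)
--     for a in answer_keys:
--         for i in by_exact.get(a, []):
--             hit[i] = True
--         if len(a) >= 5:
--             for i in by_prefix.get(a[:5], []):
--                 hit[i] = True
--     return sum(hit)
-- ===== Notes on version B (the rewrite author's own statement) =====
-- stated objective: faster
-- what changed: Inverts the iteration: instead of scanning answer_keys for every question key, B indexes the question keys once into two dicts (exact key -> indices, 5-char prefix -> indices), then drives one loop over answer_keys that marks hit flags in a boolean array via dict lookups, and returns the number of marked flags; the inner scan disappears.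
import Mathlib
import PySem

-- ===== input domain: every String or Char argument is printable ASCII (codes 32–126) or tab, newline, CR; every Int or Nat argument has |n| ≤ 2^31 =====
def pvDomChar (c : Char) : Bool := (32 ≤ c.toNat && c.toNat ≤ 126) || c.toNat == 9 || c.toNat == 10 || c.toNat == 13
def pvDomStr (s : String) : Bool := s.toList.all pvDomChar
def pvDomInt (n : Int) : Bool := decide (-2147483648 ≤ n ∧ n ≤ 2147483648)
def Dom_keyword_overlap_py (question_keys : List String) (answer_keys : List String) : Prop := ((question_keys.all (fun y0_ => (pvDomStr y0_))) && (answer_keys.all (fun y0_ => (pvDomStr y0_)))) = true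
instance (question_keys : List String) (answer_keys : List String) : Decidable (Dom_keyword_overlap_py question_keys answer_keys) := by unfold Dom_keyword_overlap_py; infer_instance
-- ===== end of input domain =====

-- B inverts the iteration: it indexes question keys by exact key and by 5-char prefix into dicts,
-- then one answer-driven pass marks hit flags in a boolean array (objective: faster, measured).

-- ===== PORT A =====
def keyword_overlap_py (question_keys : List String) (answer_keys : List String) : Int :=
  question_keys.foldl (fun hits qk =>
    if answer_keys.contains qk then hits + 1
    else if decide (5 ≤ PySem.Str.len qk) &&
        answer_keys.any (fun ak =>
          decide (5 ≤ PySem.Str.len ak) &&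
          (PySem.Str.startswith ak (PySem.Str.slice qk none (some 5)) ||
           PySem.Str.startswith qk (PySem.Str.slice ak none (some 5))))
    then hits + 1 else hits) 0

-- ===== PORT B =====
def keyword_overlap_py_alt (question_keys : List String) (answer_keys : List String) : Int :=
  let qs := question_keys
  let byExact : PySem.Dict String (List Int) :=
    (PySem.List.enumerate qs).foldl (fun d p => d.modify p.2 [] (· ++ [p.1])) PySem.Dict.empty
  let byPrefix : PySem.Dict String (List Int) :=
    (PySem.List.enumerate qs).foldl (fun d p =>
      if decide (5 ≤ PySem.Str.len p.2)
      then d.modify (PySem.Str.slice p.2 none (some 5)) [] (· ++ [p.1])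
      else d) PySem.Dict.empty
  let hit0 : List Bool := List.replicate qs.length false
  let hit := answer_keys.foldl (fun hit a =>
    let hit := (byExact.getD a []).foldl (fun h i => PySem.List.pySetD h i true) hit
    if decide (5 ≤ PySem.Str.len a)
    then (byPrefix.getD (PySem.Str.slice a none (some 5)) []).foldl
           (fun h i => PySem.List.pySetD h i true) hit
    else hit) hit0
  ((hit.count true : Nat) : Int)

-- ===== PRECONDITION & SPEC =====
def Spec_keyword_overlap_py (question_keys : List String) (answer_keys : List String) (out : Int) : Prop := out = keyword_overlap_py_alt question_keys answer_keys
instance (question_keys : List String) (answer_keys : List String) (out : Int) : Decidable (Spec_keyword_overlap_py question_keys answer_keys out) := by unfold Spec_keyword_overlap_py; infer_instance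

-- ===== CLAIM (what is proved, stated in full; the proofs are below) =====
def Claim_equal_keyword_overlap_py : Prop := ∀ (question_keys : List String) (answer_keys : List String), Dom_keyword_overlap_py question_keys answer_keys → Spec_keyword_overlap_py question_keys answer_keys (keyword_overlap_py question_keys answer_keys)

-- ===== LEMMAS AND PROOFS =====

-- A's fuzzy branch condition on one question key (abbreviation of the code in the port)
def pvAnyA (answer_keys : List String) (qk : String) : Bool :=
  decide (5 ≤ PySem.Str.len qk) &&
    answer_keys.any (fun ak =>
      decide (5 ≤ PySem.Str.len ak) &&
      (PySem.Str.startswith ak (PySem.Str.slice qk none (some 5)) ||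
       PySem.Str.startswith qk (PySem.Str.slice ak none (some 5))))

-- A's overall hit condition on one question key
def pvCondA (answer_keys : List String) (qk : String) : Bool :=
  answer_keys.contains qk || pvAnyA answer_keys qk

lemma foldA_count (answer_keys : List String) :
    ∀ (qs : List String) (n : Int),
      qs.foldl (fun hits qk =>
        if answer_keys.contains qk then hits + 1
        else if pvAnyA answer_keys qk then hits + 1 else hits) n
      = n + (qs.countP (pvCondA answer_keys) : Int) := by
  intro qs
  induction qs with
  | nil => intro n; simp
  | cons q qs ih =>
    intro n
    rw [List.foldl_cons, List.countP_cons]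
    by_cases h1 : answer_keys.contains q = true
    · rw [if_pos h1, ih]
      have hc : pvCondA answer_keys q = true := by
        unfold pvCondA; rw [h1]; rfl
      rw [if_pos hc]; push_cast; ring
    · rw [if_neg h1]
      rw [Bool.not_eq_true] at h1
      by_cases h2 : pvAnyA answer_keys q = true
      · rw [if_pos h2, ih]
        have hc : pvCondA answer_keys q = true := by
          unfold pvCondA; rw [h1, h2]; rfl
        rw [if_pos hc]; push_cast; ring
      · rw [if_neg h2, ih]
        rw [Bool.not_eq_true] at h2
        have hc : pvCondA answer_keys q = false := by
          unfold pvCondA; rw [h1, h2]; rfl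
        rw [if_neg (by rw [hc]; exact Bool.false_ne_true)]; push_cast; ring

-- mutual startswith of two length-≥5 strings is equality of their 5-char prefixes
lemma prefix5_iff (q a : List Char) (hq : 5 ≤ q.length) (ha : 5 ≤ a.length) :
    ((q.take 5).isPrefixOf a || (a.take 5).isPrefixOf q) = true ↔ a.take 5 = q.take 5 := by
  have lq : (q.take 5).length = 5 := by simp [List.length_take]; omega
  have la : (a.take 5).length = 5 := by simp [List.length_take]; omega
  constructor
  · intro h
    rcases Bool.or_eq_true_iff.mp h with h | h
    · rw [List.isPrefixOf_iff_prefix, List.prefix_iff_eq_take, lq] at h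
      exact h.symm
    · rw [List.isPrefixOf_iff_prefix, List.prefix_iff_eq_take, la] at h
      exact h
  · intro h
    apply Bool.or_eq_true_iff.mpr; left
    rw [List.isPrefixOf_iff_prefix, List.prefix_iff_eq_take, lq]
    exact h.symm

lemma slice5_toList (s : String) :
    (PySem.Str.slice s none (some 5)).toList = s.toList.take 5 := by
  rw [PySem.Str.toList_slice]
  exact PySem.List.slice_to_natCast s.toList 5

-- a fold guarded by an if is a fold over the filtered list
lemma foldl_if_filter {α β : Type} (c : α → Bool) (f : β → α → β) :
    ∀ (l : List α) (d : β),
      l.foldl (fun d x => if c x then f d x else d) d = (l.filter c).foldl f d := by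
  intro l
  induction l with
  | nil => intro d; rfl
  | cons x l ih =>
    intro d
    by_cases h : c x = true
    · simp [h, ih]
    · rw [Bool.not_eq_true] at h
      simp [h, ih]


-- fold over a list applying f to a projection = fold over the mapped list
lemma foldl_comp {α γ δ : Type} (m : α → γ) (g : δ → γ → δ) :
    ∀ (l : List α) (d : δ), l.foldl (fun d x => g d (m x)) d = (l.map m).foldl g d := by
  intro l
  induction l with
  | nil => intro d; rfl
  | cons x l ih => intro d; rw [List.foldl_cons, List.map_cons, List.foldl_cons, ih]

-- the exact-key index: membership characterization
lemma byExact_mem (qs : List String) (a : String) (i : Int) :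
    i ∈ ((PySem.List.enumerate qs).foldl
          (fun d p => d.modify p.2 [] (· ++ [p.1])) PySem.Dict.empty).getD a []
      ↔ ∃ (k : Nat) (h : k < qs.length), i = (k : Int) ∧ qs[k] = a := by
  rw [show (fun (d : PySem.Dict String (List Int)) (p : Int × String) =>
        d.modify p.2 [] (· ++ [p.1]))
      = (fun d p => (fun d (p : String × Int) => d.modify p.1 [] (· ++ [p.2])) d (p.2, p.1))
      from rfl]
  rw [foldl_comp (fun p : Int × String => (p.2, p.1))
        (fun (d : PySem.Dict String (List Int)) (p : String × Int) => d.modify p.1 [] (· ++ [p.2]))]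
  rw [PySem.Dict.getD_foldl_modify_append]
  rw [PySem.Dict.getD_empty, List.nil_append]
  constructor
  · intro hi
    rcases List.mem_map.mp hi with ⟨p, hpf, rfl⟩
    rcases List.mem_filter.mp hpf with ⟨hpm, hpa⟩
    rcases List.mem_map.mp hpm with ⟨e, he, rfl⟩
    rcases (PySem.List.mem_enumerate_iff _ _ _).mp he with ⟨k, hk, rfl⟩
    exact ⟨k, hk, by simp, by simpa using beq_iff_eq.mp hpa⟩
  · rintro ⟨k, hk, rfl, hka⟩
    apply List.mem_map.mpr
    refine ⟨(qs[k], (k : Int)), List.mem_filter.mpr ⟨?_, by simpa using hka⟩, rfl⟩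
    exact List.mem_map.mpr ⟨((k : Int), qs[k]),
      (PySem.List.mem_enumerate_iff _ _ _).mpr ⟨k, hk, by simp⟩, rfl⟩

-- the prefix index: membership characterization
lemma byPrefix_mem (qs : List String) (s : String) (i : Int) :
    i ∈ ((PySem.List.enumerate qs).foldl
          (fun d p =>
            if decide (5 ≤ PySem.Str.len p.2)
            then d.modify (PySem.Str.slice p.2 none (some 5)) [] (· ++ [p.1])
            else d) PySem.Dict.empty).getD s []
      ↔ ∃ (k : Nat) (h : k < qs.length), i = (k : Int) ∧
          5 ≤ PySem.Str.len qs[k] ∧ PySem.Str.slice qs[k] none (some 5) = s := by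
  rw [foldl_if_filter (fun p : Int × String => decide (5 ≤ PySem.Str.len p.2))]
  rw [show (fun (d : PySem.Dict String (List Int)) (p : Int × String) =>
        d.modify (PySem.Str.slice p.2 none (some 5)) [] (· ++ [p.1]))
      = (fun d p => (fun d (p : String × Int) => d.modify p.1 [] (· ++ [p.2])) d
          (PySem.Str.slice p.2 none (some 5), p.1)) from rfl]
  rw [foldl_comp (fun p : Int × String => (PySem.Str.slice p.2 none (some 5), p.1))
        (fun (d : PySem.Dict String (List Int)) (p : String × Int) => d.modify p.1 [] (· ++ [p.2]))]
  rw [PySem.Dict.getD_foldl_modify_append]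
  rw [PySem.Dict.getD_empty, List.nil_append]
  constructor
  · intro hi
    rcases List.mem_map.mp hi with ⟨p, hpf, rfl⟩
    rcases List.mem_filter.mp hpf with ⟨hpm, hps⟩
    rcases List.mem_map.mp hpm with ⟨e, he, rfl⟩
    rcases List.mem_filter.mp he with ⟨he2, hlen⟩
    rcases (PySem.List.mem_enumerate_iff _ _ _).mp he2 with ⟨k, hk, rfl⟩
    exact ⟨k, hk, by simp, by simpa using hlen, by simpa using beq_iff_eq.mp hps⟩
  · rintro ⟨k, hk, rfl, hlen, hsl⟩
    apply List.mem_map.mpr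
    refine ⟨(PySem.Str.slice qs[k] none (some 5), (k : Int)),
      List.mem_filter.mpr ⟨?_, by simpa using hsl⟩, rfl⟩
    apply List.mem_map.mpr
    refine ⟨((k : Int), qs[k]), List.mem_filter.mpr
      ⟨(PySem.List.mem_enumerate_iff _ _ _).mpr ⟨k, hk, by simp⟩, by simpa using hlen⟩, rfl⟩

-- the marking fold preserves length
lemma mark_length (idxs : List Int) : ∀ (h : List Bool),
    (idxs.foldl (fun h i => PySem.List.pySetD h i true) h).length = h.length := by
  induction idxs with
  | nil => intro h; rfl
  | cons i idxs ih =>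
    intro h
    rw [List.foldl_cons, ih, PySem.List.length_pySetD]

-- effect of the marking fold on one position (indices are nonnegative in-range)
lemma mark_getD (idxs : List Int) : ∀ (h : List Bool) (j : Nat),
    j < h.length →
    (∀ i ∈ idxs, ∃ k : Nat, k < h.length ∧ i = (k : Int)) →
    (idxs.foldl (fun h i => PySem.List.pySetD h i true) h).getD j false
      = (h.getD j false || decide ((j : Int) ∈ idxs)) := by
  induction idxs with
  | nil => intro h j hj _; simp
  | cons i idxs ih =>
    intro h j hj hin
    rcases hin i (List.mem_cons_self) with ⟨k, hk, rfl⟩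
    rw [List.foldl_cons, PySem.List.pySetD_natCast]
    rw [ih (h.set k true) j (by simpa using hj)
      (fun i hi => by
        rcases hin i (List.mem_cons_of_mem _ hi) with ⟨k', hk', rfl⟩
        exact ⟨k', by simpa using hk', rfl⟩)]
    rw [List.getD_eq_getElem _ _ (by simpa using hj), List.getD_eq_getElem _ _ hj]
    rw [List.getElem_set]
    by_cases hkj : k = j
    · subst hkj; simp [List.mem_cons]
    · rw [if_neg hkj]
      have hne : ¬ ((j : Int) = (k : Int)) := fun h => hkj (by exact_mod_cast h.symm)
      simp [List.mem_cons, hne]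

-- B's per-answer hit condition on one position j (via the two index dicts of qs)
def pvCondB (qs : List String) (j : Nat) (a : String) : Bool :=
  decide ((j : Int) ∈ ((PySem.List.enumerate qs).foldl
      (fun d p => d.modify p.2 [] (· ++ [p.1])) PySem.Dict.empty).getD a []) ||
  (decide (5 ≤ PySem.Str.len a) &&
    decide ((j : Int) ∈ ((PySem.List.enumerate qs).foldl
      (fun d p =>
        if decide (5 ≤ PySem.Str.len p.2)
        then d.modify (PySem.Str.slice p.2 none (some 5)) [] (· ++ [p.1])
        else d) PySem.Dict.empty).getD (PySem.Str.slice a none (some 5)) []))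

-- all indices stored in the dicts are in range
lemma byExact_inrange (qs : List String) (a : String) (n : Nat) (hn : n = qs.length) :
    ∀ i ∈ ((PySem.List.enumerate qs).foldl
        (fun d p => d.modify p.2 [] (· ++ [p.1])) PySem.Dict.empty).getD a [],
      ∃ k : Nat, k < n ∧ i = (k : Int) := by
  intro i hi
  rcases (byExact_mem qs a i).mp hi with ⟨k, hk, rfl, _⟩
  exact ⟨k, hn ▸ hk, rfl⟩

lemma byPrefix_inrange (qs : List String) (s : String) (n : Nat) (hn : n = qs.length) :
    ∀ i ∈ ((PySem.List.enumerate qs).foldl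
        (fun d p =>
          if decide (5 ≤ PySem.Str.len p.2)
          then d.modify (PySem.Str.slice p.2 none (some 5)) [] (· ++ [p.1])
          else d) PySem.Dict.empty).getD s [],
      ∃ k : Nat, k < n ∧ i = (k : Int) := by
  intro i hi
  rcases (byPrefix_mem qs s i).mp hi with ⟨k, hk, rfl, _⟩
  exact ⟨k, hn ▸ hk, rfl⟩


-- the outer answer loop preserves the flag-array length
lemma outer_length (qs : List String) (as : List String) : ∀ (hit : List Bool),
    (as.foldl (fun hit a =>
        let hit := (((PySem.List.enumerate qs).foldl
            (fun d p => d.modify p.2 [] (· ++ [p.1])) PySem.Dict.empty).getD a []).foldl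
            (fun h i => PySem.List.pySetD h i true) hit
        if decide (5 ≤ PySem.Str.len a)
        then (((PySem.List.enumerate qs).foldl
            (fun d p =>
              if decide (5 ≤ PySem.Str.len p.2)
              then d.modify (PySem.Str.slice p.2 none (some 5)) [] (· ++ [p.1])
              else d) PySem.Dict.empty).getD (PySem.Str.slice a none (some 5)) []).foldl
            (fun h i => PySem.List.pySetD h i true) hit
        else hit) hit).length = hit.length := by
  induction as with
  | nil => intro hit; rfl
  | cons a as ih =>
    intro hit
    rw [List.foldl_cons]
    by_cases ha : decide (5 ≤ PySem.Str.len a) = true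
    · simp only [ha, if_pos, ih, mark_length]
    · rw [Bool.not_eq_true] at ha
      simp only [ha, Bool.false_eq_true, if_false, ih, mark_length]

-- the outer answer loop: final flag at j = initial flag OR some answer hits j
lemma outer_getD (qs : List String) (as : List String) : ∀ (hit : List Bool) (j : Nat),
    j < hit.length → hit.length = qs.length →
    (as.foldl (fun hit a =>
        let hit := (((PySem.List.enumerate qs).foldl
            (fun d p => d.modify p.2 [] (· ++ [p.1])) PySem.Dict.empty).getD a []).foldl
            (fun h i => PySem.List.pySetD h i true) hit
        if decide (5 ≤ PySem.Str.len a)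
        then (((PySem.List.enumerate qs).foldl
            (fun d p =>
              if decide (5 ≤ PySem.Str.len p.2)
              then d.modify (PySem.Str.slice p.2 none (some 5)) [] (· ++ [p.1])
              else d) PySem.Dict.empty).getD (PySem.Str.slice a none (some 5)) []).foldl
            (fun h i => PySem.List.pySetD h i true) hit
        else hit) hit).getD j false
      = (hit.getD j false || as.any (pvCondB qs j)) := by
  induction as with
  | nil => intro hit j _ _; simp
  | cons a as ih =>
    intro hit j hj hlen
    rw [List.foldl_cons]
    set h1 := (((PySem.List.enumerate qs).foldl
        (fun d p => d.modify p.2 [] (· ++ [p.1])) PySem.Dict.empty).getD a []).foldl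
        (fun h i => PySem.List.pySetD h i true) hit with hh1
    have hlen1 : h1.length = hit.length := mark_length _ hit
    have hgd1 : h1.getD j false = (hit.getD j false ||
        decide ((j : Int) ∈ ((PySem.List.enumerate qs).foldl
          (fun d p => d.modify p.2 [] (· ++ [p.1])) PySem.Dict.empty).getD a [])) := by
      rw [hh1]
      exact mark_getD _ hit j hj (byExact_inrange qs a hit.length hlen)
    by_cases ha : decide (5 ≤ PySem.Str.len a) = true
    · simp only [ha, if_pos]
      set h2 := (((PySem.List.enumerate qs).foldl
          (fun d p =>
            if decide (5 ≤ PySem.Str.len p.2)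
            then d.modify (PySem.Str.slice p.2 none (some 5)) [] (· ++ [p.1])
            else d) PySem.Dict.empty).getD (PySem.Str.slice a none (some 5)) []).foldl
          (fun h i => PySem.List.pySetD h i true) h1 with hh2
      have hlen2 : h2.length = hit.length := by rw [hh2, mark_length, hlen1]
      have hgd2 : h2.getD j false = (h1.getD j false ||
          decide ((j : Int) ∈ ((PySem.List.enumerate qs).foldl
            (fun d p =>
              if decide (5 ≤ PySem.Str.len p.2)
              then d.modify (PySem.Str.slice p.2 none (some 5)) [] (· ++ [p.1])
              else d) PySem.Dict.empty).getD (PySem.Str.slice a none (some 5)) [])) := by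
        rw [hh2]
        exact mark_getD _ h1 j (by rw [hlen1]; exact hj)
          (fun i hi => by
            rcases byPrefix_inrange qs _ hit.length hlen i hi with ⟨k, hk, rfl⟩
            exact ⟨k, by rw [hlen1]; exact hk, rfl⟩)
      rw [ih h2 j (by rw [hlen2]; exact hj) (by rw [hlen2]; exact hlen)]
      rw [hgd2, hgd1, List.any_cons]
      unfold pvCondB
      rw [ha]
      simp [Bool.or_assoc]
    · rw [Bool.not_eq_true] at ha
      simp only [ha, Bool.false_eq_true, if_false]
      rw [ih h1 j (by rw [hlen1]; exact hj) (by rw [hlen1]; exact hlen)]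
      rw [hgd1, List.any_cons]
      unfold pvCondB
      rw [ha]
      simp [Bool.or_assoc]

-- for an in-range j, B's any-condition coincides with A's condition on qs[j]
lemma condB_eq_condA (qs as : List String) (j : Nat) (hj : j < qs.length) :
    as.any (pvCondB qs j) = pvCondA as qs[j] := by
  unfold pvCondA pvAnyA
  rw [Bool.eq_iff_iff, List.any_eq_true]
  constructor
  · rintro ⟨a, ha, hcond⟩
    unfold pvCondB at hcond
    rcases Bool.or_eq_true_iff.mp hcond with h | h
    · rcases (byExact_mem qs a _).mp (of_decide_eq_true h) with ⟨k, hk, hkj, hka⟩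
      have hjk : j = k := by exact_mod_cast hkj
      have hqa : qs[j] = a := by rw [show qs[j] = qs[k] from by simp [hjk], hka]
      apply Bool.or_eq_true_iff.mpr; left
      rw [List.contains_iff_mem, hqa]; exact ha
    · rcases Bool.and_eq_true_iff.mp h with ⟨halen, hmem⟩
      rcases (byPrefix_mem qs _ _).mp (of_decide_eq_true hmem) with ⟨k, hk, hkj, hqlen, hsl⟩
      have hjk : j = k := by exact_mod_cast hkj
      have hq : qs[j] = qs[k] := by simp [hjk]
      apply Bool.or_eq_true_iff.mpr; right
      rw [Bool.and_eq_true_iff]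
      refine ⟨decide_eq_true (by rw [hq]; exact hqlen), List.any_eq_true.mpr ⟨a, ha, ?_⟩⟩
      rw [Bool.and_eq_true_iff]
      refine ⟨halen, ?_⟩
      have hq5 : 5 ≤ (qs[j]).toList.length := by
        have h5 : (5 : Int) ≤ PySem.Str.len qs[j] := by rw [hq]; exact hqlen
        simp only [PySem.Str.len] at h5; exact_mod_cast h5
      have ha5 : 5 ≤ a.toList.length := by
        have h5 := of_decide_eq_true halen
        simp only [PySem.Str.len] at h5; exact_mod_cast h5
      simp only [PySem.Str.startswith, PySem.Chars.startswith, slice5_toList]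
      apply (prefix5_iff (qs[j]).toList a.toList hq5 ha5).mpr
      have hsl2 : PySem.Str.slice qs[j] none (some 5) = PySem.Str.slice a none (some 5) := by
        rw [hq, hsl]
      have := congrArg String.toList hsl2
      rw [slice5_toList, slice5_toList] at this
      exact this.symm
  · intro h
    rcases Bool.or_eq_true_iff.mp h with h | h
    · have ha : qs[j] ∈ as := List.contains_iff_mem.mp h
      refine ⟨qs[j], ha, ?_⟩
      unfold pvCondB
      apply Bool.or_eq_true_iff.mpr; left
      exact decide_eq_true ((byExact_mem qs _ _).mpr ⟨j, hj, rfl, rfl⟩)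
    · rcases Bool.and_eq_true_iff.mp h with ⟨hqlen, hany⟩
      rcases List.any_eq_true.mp hany with ⟨a, ha, hcond⟩
      rcases Bool.and_eq_true_iff.mp hcond with ⟨halen, hsw⟩
      have hq5 : 5 ≤ (qs[j]).toList.length := by
        have h5 := of_decide_eq_true hqlen
        simp only [PySem.Str.len] at h5; exact_mod_cast h5
      have ha5 : 5 ≤ a.toList.length := by
        have h5 := of_decide_eq_true halen
        simp only [PySem.Str.len] at h5; exact_mod_cast h5
      simp only [PySem.Str.startswith, PySem.Chars.startswith, slice5_toList] at hsw
      have htake : a.toList.take 5 = (qs[j]).toList.take 5 :=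
        (prefix5_iff (qs[j]).toList a.toList hq5 ha5).mp hsw
      refine ⟨a, ha, ?_⟩
      unfold pvCondB
      apply Bool.or_eq_true_iff.mpr; right
      rw [Bool.and_eq_true_iff]
      refine ⟨halen, decide_eq_true ((byPrefix_mem qs _ _).mpr
        ⟨j, hj, rfl, of_decide_eq_true hqlen, ?_⟩)⟩
      apply String.toList_inj.mp
      rw [slice5_toList, slice5_toList]
      exact htake.symm

-- ===== VERDICT (by name: the statement is the Claim_ definition above) =====
theorem keyword_overlap_py_spec : Claim_equal_keyword_overlap_py := by
  intro qs as _
  unfold Spec_keyword_overlap_py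
  show keyword_overlap_py qs as = keyword_overlap_py_alt qs as
  have hA : keyword_overlap_py qs as = (qs.countP (pvCondA as) : Int) := by
    unfold keyword_overlap_py
    rw [show (fun (hits : Int) (qk : String) =>
        if as.contains qk then hits + 1
        else if decide (5 ≤ PySem.Str.len qk) &&
            as.any (fun ak =>
              decide (5 ≤ PySem.Str.len ak) &&
              (PySem.Str.startswith ak (PySem.Str.slice qk none (some 5)) ||
               PySem.Str.startswith qk (PySem.Str.slice ak none (some 5))))
        then hits + 1 else hits)
      = (fun hits qk => if as.contains qk then hits + 1
          else if pvAnyA as qk then hits + 1 else hits) from rfl]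
    rw [foldA_count]; ring
  rw [hA]
  unfold keyword_overlap_py_alt
  simp only []
  set hit := as.foldl (fun hit a =>
      let hit := (((PySem.List.enumerate qs).foldl
          (fun d p => d.modify p.2 [] (· ++ [p.1])) PySem.Dict.empty).getD a []).foldl
          (fun h i => PySem.List.pySetD h i true) hit
      if decide (5 ≤ PySem.Str.len a)
      then (((PySem.List.enumerate qs).foldl
          (fun d p =>
            if decide (5 ≤ PySem.Str.len p.2)
            then d.modify (PySem.Str.slice p.2 none (some 5)) [] (· ++ [p.1])
            else d) PySem.Dict.empty).getD (PySem.Str.slice a none (some 5)) []).foldl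
          (fun h i => PySem.List.pySetD h i true) hit
      else hit) (List.replicate qs.length false) with hhit
  have hlen : hit.length = qs.length := by
    rw [hhit, outer_length]
    exact List.length_replicate
  have hval : hit = qs.map (fun q => pvCondA as q) := by
    apply List.ext_getElem
    · rw [hlen, List.length_map]
    · intro j hj hj2
      have hjq : j < qs.length := by rw [hlen] at hj; exact hj
      have h0len : (List.replicate qs.length false).length = qs.length :=
        List.length_replicate
      have := outer_getD qs as (List.replicate qs.length false) j
        (by rw [h0len]; exact hjq) h0len
      rw [← hhit] at this
      rw [List.getD_eq_getElem _ _ hj] at this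
      rw [List.getElem_map]
      rw [this, List.getD_eq_getElem _ _ (by rw [h0len]; exact hjq)]
      rw [List.getElem_replicate, condB_eq_condA qs as j hjq]
      simp
  rw [hval]
  rw [List.count_eq_countP, List.countP_map]
  congr 1
  apply List.countP_congr
  intro q _
  simp
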